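-- pv_equiv track=rewrite | github.com/Kwounsu/Algorithms | 프로그래머스/쿠키 구입.py | solution
-- ===== SOURCE A (Python) =====
-- from itertools import accumulate
--
-- def solution(cookie):
--     answer = 0
--     for m in range(len(cookie) - 1):
--         a = set(accumulate(reversed(cookie[:m+1])))
--         b = set(accumulate(cookie[m+1:]))
--         c = a & b
--
--         if c:
--             answer = max(*c, answer)
--     return answer
-- ===== SOURCE B (Python) =====
-- def solution(cookie):
--     n = len(cookie)
--     P = [0]
--     for v in cookie:
--         P.append(P[-1] + v)
--     last = {}
--     for j, p in enumerate(P):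
--         last[p] = j
--     answer = 0
--     lg = last.get
--     for m in range(n - 1):
--         pm = P[m + 1]
--         t2 = 2 * pm
--         m2 = m + 2
--         mn = min((p for p in P[:m + 1] if lg(t2 - p, -1) >= m2), default=None)
--         if mn is not None:
--             answer = max(answer, pm - mn)
--     return answer
-- ===== Notes on version B (the rewrite author's own statement) =====
-- stated objective: alternative
-- what changed: Instead of building two accumulate-sets and intersecting them for every split point, B computes one global prefix-sum table and a last-occurrence dictionary of prefix-sum values once, and tests a common adjacent-segment sum arithmetically (prefix[j] = 2*prefix[m+1] - prefix[i]) with a single dict lookup per candidate.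
import Mathlib
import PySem

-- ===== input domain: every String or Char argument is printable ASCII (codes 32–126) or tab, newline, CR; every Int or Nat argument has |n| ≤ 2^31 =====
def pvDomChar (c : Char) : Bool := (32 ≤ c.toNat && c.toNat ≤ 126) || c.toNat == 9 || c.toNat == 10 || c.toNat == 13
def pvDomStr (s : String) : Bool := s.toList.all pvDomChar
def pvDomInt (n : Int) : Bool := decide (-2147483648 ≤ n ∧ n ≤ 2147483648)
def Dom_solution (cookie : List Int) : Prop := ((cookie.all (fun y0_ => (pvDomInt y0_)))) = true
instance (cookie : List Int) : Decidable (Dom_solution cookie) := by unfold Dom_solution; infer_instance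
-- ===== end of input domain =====

-- B replaces A's per-split accumulate-set intersections by one global prefix-sum table plus a
-- last-occurrence index dictionary, testing common sums arithmetically (alternative decomposition).

-- ===== PORT A =====
-- itertools.accumulate
def pvAccum (acc : Int) : List Int → List Int
  | [] => []
  | x :: t => (acc + x) :: pvAccum (acc + x) t

def solution (cookie : List Int) : Int :=
  (PySem.List.pyRange 0 ((cookie.length : Int) - 1) 1).foldl (fun answer m =>
    let a : PySem.Set Int := PySem.Set.ofList (pvAccum 0 (PySem.List.slice cookie none (some (m + 1))).reverse)
    let b : PySem.Set Int := PySem.Set.ofList (pvAccum 0 (PySem.List.slice cookie (some (m + 1)) none))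
    let c : PySem.Set Int := PySem.Set.inter a b
    if c = [] then answer else c.foldl max answer) 0

-- ===== PORT B =====
def solution_alt (cookie : List Int) : Int :=
  let P : List Int := cookie.foldl (fun P v => P ++ [PySem.List.pyGetD P (-1) 0 + v]) [0]
  let last : PySem.Dict Int Int :=
    (PySem.List.enumerate P 0).foldl (fun d jp => d.insert jp.2 jp.1) PySem.Dict.empty
  (PySem.List.pyRange 0 ((cookie.length : Int) - 1) 1).foldl (fun answer m =>
    let pm := PySem.List.pyGetD P (m + 1) 0
    let t2 := 2 * pm
    let m2 := m + 2
    let mn : Option Int := PySem.List.min?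
      ((PySem.List.slice P none (some (m + 1))).filter (fun p => decide (m2 ≤ last.getD (t2 - p) (-1))))
      (fun x => x)
    match mn with
    | none => answer
    | some mn => max answer (pm - mn)) 0

-- ===== PRECONDITION & SPEC =====
def Spec_solution (cookie : List Int) (out : Int) : Prop := out = solution_alt cookie
instance (cookie : List Int) (out : Int) : Decidable (Spec_solution cookie out) := by unfold Spec_solution; infer_instance

-- ===== CLAIM (what is proved, stated in full; the proofs are below) =====
def Claim_equal_solution : Prop := ∀ (cookie : List Int), Dom_solution cookie → Spec_solution cookie (solution cookie)

-- ===== LEMMAS AND PROOFS =====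

-- prefix sum of the first k cookies
def pvPre (cookie : List Int) (k : Nat) : Int := (cookie.take k).sum

theorem pvAccum_eq_map (l : List Int) (a : Int) :
    pvAccum a l = (List.range l.length).map (fun k => a + (l.take (k + 1)).sum) := by
  induction l generalizing a with
  | nil => simp [pvAccum]
  | cons x t ih =>
    simp only [pvAccum, List.length_cons, List.range_succ_eq_map, List.map_cons, List.map_map]
    congr 1
    · simp
    · rw [ih]
      apply List.map_congr_left
      intro k hk
      simp [List.take_succ_cons, add_assoc]

theorem mem_pvAccum (l : List Int) (a v : Int) :
    v ∈ pvAccum a l ↔ ∃ k < l.length, v = a + (l.take (k + 1)).sum := by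
  rw [pvAccum_eq_map]
  simp [List.mem_map, eq_comm]

theorem mem_pvAccum_reverse (l : List Int) (v : Int) :
    v ∈ pvAccum 0 l.reverse ↔ ∃ i < l.length, v = l.sum - (l.take i).sum := by
  rw [mem_pvAccum]
  simp only [List.length_reverse]
  constructor
  · rintro ⟨k, hk, rfl⟩
    refine ⟨l.length - (k + 1), by omega, ?_⟩
    rw [List.take_reverse, List.sum_reverse]
    have := List.sum_take_add_sum_drop l (l.length - (k + 1))
    linarith
  · rintro ⟨i, hi, rfl⟩
    refine ⟨l.length - (i + 1), by omega, ?_⟩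
    rw [List.take_reverse, List.sum_reverse]
    have h1 : l.length - (l.length - (i + 1) + 1) = i := by omega
    rw [h1]
    have := List.sum_take_add_sum_drop l i
    linarith

theorem mem_pvAccum_drop (l : List Int) (s : Nat) (v : Int) :
    v ∈ pvAccum 0 (l.drop s) ↔ ∃ j, s < j ∧ j ≤ l.length ∧ v = (l.take j).sum - (l.take s).sum := by
  rw [mem_pvAccum]
  simp only [List.length_drop]
  have key : ∀ t : Nat, ((l.drop s).take t).sum = (l.take (s + t)).sum - (l.take s).sum := by
    intro t
    have h := List.sum_take_add_sum_drop (l.take (s + t)) s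
    rw [List.take_take, min_eq_left (by omega), List.drop_take] at h
    have h2 : s + t - s = t := by omega
    rw [h2] at h
    linarith
  constructor
  · rintro ⟨k, hk, rfl⟩
    exact ⟨s + (k + 1), by omega, by omega, by rw [key]; ring⟩
  · rintro ⟨j, hj1, hj2, rfl⟩
    refine ⟨j - s - 1, by omega, ?_⟩
    rw [key]
    have : s + (j - s - 1 + 1) = j := by omega
    rw [this]
    ring

theorem pvLast_ge_iff (L : List (Int × Int)) (hp : L.Pairwise (fun p q => p.1 < q.1)) (key t : Int)
    (ht : -1 < t) :
    t ≤ (L.foldl (fun d jp => d.insert jp.2 jp.1) (PySem.Dict.empty : PySem.Dict Int Int)).getD key (-1)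
      ↔ ∃ q ∈ L, q.2 = key ∧ t ≤ q.1 := by
  induction L using List.reverseRecOn with
  | nil => simp [PySem.Dict.getD_empty]; omega
  | append_singleton L q ih =>
    rw [List.pairwise_append] at hp
    rw [List.foldl_append]
    simp only [List.foldl_cons, List.foldl_nil]
    rw [PySem.Dict.getD_insert]
    by_cases hk : key = q.2
    · subst hk
      rw [if_pos rfl]
      constructor
      · intro h
        exact ⟨q, by simp, rfl, h⟩
      · rintro ⟨q', hq', hqk, hq't⟩
        rcases List.mem_append.1 hq' with h | h
        · have := hp.2.2 q' h q (by simp)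
          omega
        · simp at h
          subst h
          exact hq't
    · rw [if_neg hk]
      rw [ih hp.1]
      constructor
      · rintro ⟨q', hq', rfl, h⟩
        exact ⟨q', by simp [hq'], rfl, h⟩
      · rintro ⟨q', hq', rfl, h⟩
        rcases List.mem_append.1 hq' with h' | h'
        · exact ⟨q', h', rfl, h⟩
        · simp at h'
          subst h'
          exact absurd rfl hk

theorem pvFoldP (xs : List Int) (acc : List Int) (hne : acc ≠ []) :
    xs.foldl (fun P v => P ++ [PySem.List.pyGetD P (-1) 0 + v]) acc
      = acc ++ pvAccum (acc.getLast hne) xs := by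
  induction xs generalizing acc with
  | nil => simp [pvAccum]
  | cons x t ih =>
    simp only [List.foldl_cons, pvAccum]
    rw [PySem.List.pyGetD_neg_one acc 0 hne]
    rw [ih (acc ++ [acc.getLast hne + x]) (by simp)]
    rw [List.getLast_append]
    simp

theorem pvP_eq (cookie : List Int) :
    cookie.foldl (fun P v => P ++ [PySem.List.pyGetD P (-1) 0 + v]) [0]
      = (List.range (cookie.length + 1)).map (pvPre cookie) := by
  rw [pvFoldP cookie [0] (by simp)]
  rw [List.range_succ_eq_map, List.map_cons, List.map_map]
  rw [pvAccum_eq_map]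
  simp only [List.getLast_singleton, List.singleton_append]
  refine List.cons_eq_cons.mpr ⟨by simp [pvPre], ?_⟩
  apply List.map_congr_left
  intro k hk
  simp [pvPre, Function.comp, Nat.succ_eq_add_one]

theorem pvFoldMax (c : List Int) (answer pm mn : Int) (L : List Int)
    (hmem : ∀ x, x ∈ c ↔ ∃ p ∈ L, x = pm - p)
    (hmn : PySem.List.min? L (fun x => x) = some mn) :
    c.foldl max answer = max answer (pm - mn) := by
  have hmnL : mn ∈ L := PySem.List.min?_mem hmn
  have hmin : ∀ y ∈ L, mn ≤ y := PySem.List.min?_isMin hmn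
  have h1 := PySem.List.le_foldl_max c answer
  apply le_antisymm
  · rcases PySem.List.foldl_max_mem c answer with h | h
    · rw [h]; exact le_max_left _ _
    · rcases (hmem _).1 h with ⟨p, hpL, heq⟩
      have := hmin p hpL
      rw [heq]
      have h2 : pm - p ≤ pm - mn := by omega
      exact le_trans h2 (le_max_right _ _)
  · apply max_le h1.1
    exact h1.2 _ ((hmem _).2 ⟨mn, hmnL, rfl⟩)

-- ===== VERDICT (by name: the statement is the Claim_ definition above) =====
theorem solution_spec : Claim_equal_solution := by
  intro cookie _
  show solution cookie = solution_alt cookie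
  simp only [solution, solution_alt]
  rw [pvP_eq]
  apply PySem.List.foldl_congr_mem
  intro answer m hm
  rw [PySem.List.mem_pyRange_one] at hm
  obtain ⟨h0, h1⟩ := hm
  obtain ⟨m', rfl⟩ := Int.eq_ofNat_of_zero_le h0
  have hmn : m' + 2 ≤ cookie.length := by omega
  -- slices to take/drop
  rw [PySem.List.slice_to cookie (by omega : (0:Int) ≤ (m' : Int) + 1),
      PySem.List.slice_to ((List.range (cookie.length + 1)).map (pvPre cookie))
        (by omega : (0:Int) ≤ (m' : Int) + 1),
      PySem.List.slice_from cookie (by omega : (0:Int) ≤ (m' : Int) + 1)]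
  have htn : ((m' : Int) + 1).toNat = m' + 1 := by omega
  rw [htn]
  -- pm
  have hcast : ((m' : Int) + 1) = (((m' + 1 : Nat)) : Int) := by push_cast; ring
  have hpm : PySem.List.pyGetD ((List.range (cookie.length + 1)).map (pvPre cookie)) ((m' : Int) + 1) 0
      = pvPre cookie (m' + 1) := by
    rw [hcast, PySem.List.pyGetD_natCast]
    rw [List.getD_eq_getElem?_getD]
    rw [List.getElem?_map, List.getElem?_range (by omega)]
    simp
  rw [hpm]
  -- take of P
  have hPt : ((List.range (cookie.length + 1)).map (pvPre cookie)).take (m' + 1)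
      = (List.range (m' + 1)).map (pvPre cookie) := by
    rw [← List.map_take, List.take_range, min_eq_left (by omega)]
  rw [hPt]
  -- the condition, characterized
  have hcond : ∀ p : Int,
      ((m' : Int) + 2 ≤ (((PySem.List.enumerate ((List.range (cookie.length + 1)).map (pvPre cookie)) 0).foldl
          (fun d jp => d.insert jp.2 jp.1) PySem.Dict.empty).getD (2 * pvPre cookie (m' + 1) - p) (-1)))
        ↔ ∃ j, m' + 2 ≤ j ∧ j ≤ cookie.length ∧ pvPre cookie j = 2 * pvPre cookie (m' + 1) - p := by
    intro p
    rw [pvLast_ge_iff _ (PySem.List.pairwise_lt_enumerate _ _) _ _ (by omega)]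
    constructor
    · rintro ⟨q, hq, hq2, hq1⟩
      rw [PySem.List.mem_enumerate_iff] at hq
      obtain ⟨k, hk, rfl⟩ := hq
      simp only [List.length_map, List.length_range] at hk
      refine ⟨k, ?_, by omega, ?_⟩
      · simp only [zero_add] at hq1
        omega
      · rw [← hq2]
        simp
    · rintro ⟨j, hj1, hj2, hjv⟩
      refine ⟨((j : Int), pvPre cookie j), ?_, hjv, by push_cast; omega⟩
      rw [PySem.List.mem_enumerate_iff]
      refine ⟨j, by simp; omega, ?_⟩
      simp
  -- membership characterization of the intersection
  set F : List Int := ((List.range (m' + 1)).map (pvPre cookie)).filter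
      (fun p => decide ((m' : Int) + 2 ≤ (((PySem.List.enumerate ((List.range (cookie.length + 1)).map (pvPre cookie)) 0).foldl
          (fun d jp => d.insert jp.2 jp.1) PySem.Dict.empty).getD (2 * pvPre cookie (m' + 1) - p) (-1)))) with hFdef
  set c : PySem.Set Int := PySem.Set.inter
      (PySem.Set.ofList (pvAccum 0 (cookie.take (m' + 1)).reverse))
      (PySem.Set.ofList (pvAccum 0 (cookie.drop (m' + 1)))) with hcdef
  have hmemc : ∀ x, x ∈ c ↔ ∃ p ∈ F, x = pvPre cookie (m' + 1) - p := by
    intro x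
    rw [hcdef, PySem.Set.mem_inter, PySem.Set.mem_ofList, PySem.Set.mem_ofList,
        mem_pvAccum_reverse, mem_pvAccum_drop]
    constructor
    · rintro ⟨⟨i, hi, hxa⟩, ⟨j, hj1, hj2, hxb⟩⟩
      rw [List.length_take] at hi
      refine ⟨pvPre cookie i, ?_, ?_⟩
      · rw [hFdef, List.mem_filter]
        constructor
        · exact List.mem_map.2 ⟨i, List.mem_range.2 (by omega), rfl⟩
        · rw [decide_eq_true_iff, hcond]
          refine ⟨j, by omega, hj2, ?_⟩
          have e1 : (cookie.take (m' + 1)).sum = pvPre cookie (m' + 1) := rfl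
          have e2 : ((cookie.take (m' + 1)).take i) = cookie.take i := by
            rw [List.take_take]; congr 1; omega
          rw [e1, e2] at hxa
          unfold pvPre at *
          omega
      · have e1 : (cookie.take (m' + 1)).sum = pvPre cookie (m' + 1) := rfl
        have e2 : ((cookie.take (m' + 1)).take i) = cookie.take i := by
          rw [List.take_take]; congr 1; omega
        rw [e1, e2] at hxa
        exact hxa
    · rintro ⟨p, hpF, rfl⟩
      rw [hFdef, List.mem_filter] at hpF
      obtain ⟨hpm', hpc⟩ := hpF
      obtain ⟨i, hi, rfl⟩ := List.mem_map.1 hpm'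
      rw [List.mem_range] at hi
      rw [decide_eq_true_iff, hcond] at hpc
      obtain ⟨j, hj1, hj2, hjv⟩ := hpc
      constructor
      · refine ⟨i, ?_, ?_⟩
        · rw [List.length_take]; omega
        · have e1 : (cookie.take (m' + 1)).sum = pvPre cookie (m' + 1) := rfl
          have e2 : ((cookie.take (m' + 1)).take i) = cookie.take i := by
            rw [List.take_take]; congr 1; omega
          rw [e1, e2]
          rfl
      · refine ⟨j, by omega, hj2, ?_⟩
        have e1 : (cookie.take j).sum = pvPre cookie j := rfl
        have e2 : (cookie.take (m' + 1)).sum = pvPre cookie (m' + 1) := rfl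
        rw [e1, e2, hjv]
        ring
  rcases hmin : PySem.List.min? F (fun x => x) with _ | mn
  · -- no common sum
    have hFnil : F = [] := (PySem.List.min?_eq_none_iff F (fun x => x)).1 hmin
    have hcnil : c = [] := by
      apply List.eq_nil_iff_forall_not_mem.2
      intro x hx
      rcases (hmemc x).1 hx with ⟨p, hp, _⟩
      rw [hFnil] at hp
      exact absurd hp (List.not_mem_nil)
    rw [if_pos hcnil]
  · have hcne : c ≠ [] := by
      intro hnil
      have : pvPre cookie (m' + 1) - mn ∈ c :=
        (hmemc _).2 ⟨mn, PySem.List.min?_mem hmin, rfl⟩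
      rw [hnil] at this
      exact absurd this (List.not_mem_nil)
    rw [if_neg hcne]
    exact pvFoldMax c answer _ mn F hmemc hmin
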